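-- pv_equiv track=rewrite | github.com/Zzxmh/HypEReg-Transmorph | draft/build_arxiv_tex.py | replace_command
-- ===== SOURCE A (Python) =====
-- def _extract_braced(src: str, start_open: int) -> tuple[str, int]:
--     """Return (inner, index_after_closing_brace). start_open points at '{'."""
--     if start_open < 0 or start_open >= len(src) or src[start_open] != "{":
--         raise ValueError("expected '{'")
--     depth = 0
--     for i in range(start_open, len(src)):
--         if src[i] == "{":
--             depth += 1
--         elif src[i] == "}":
--             depth -= 1
--             if depth == 0:
--                 return src[start_open + 1 : i], i + 1
--     raise ValueError("unbalanced braces")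
--
-- def replace_command(body: str, cmd: str, replacement_prefix: str) -> str:
--     r"""Replace \cmd{...} with replacement_prefix + content (braces stripped)."""
--     token = f"\\{cmd}{{"
--     out: list[str] = []
--     i = 0
--     while i < len(body):
--         j = body.find(token, i)
--         if j == -1:
--             out.append(body[i:])
--             break
--         out.append(body[i:j])
--         open_idx = j + len(token) - 1
--         inner, after = _extract_braced(body, open_idx)
--         out.append(replacement_prefix + inner)
--         i = after
--     return "".join(out)
-- ===== SOURCE B (Python) =====
-- def replace_command(body: str, cmd: str, replacement_prefix: str) -> str:
--     r"""Replace \cmd{...} with replacement_prefix + content (braces stripped).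
--
--     Single-pass two-mode automaton: no find() loop, no separate brace
--     extractor, no slicing -- one character scan with an explicit mode
--     (copying vs. inside-braces) and a running depth counter.
--     """
--     token = "\\" + cmd + "{"
--     tlen = len(token)
--     out = []
--     inner = None  # None = copying mode; list of chars = inside braces
--     depth = 0
--     i = 0
--     n = len(body)
--     while i < n:
--         if inner is None:
--             if body.startswith(token, i):
--                 inner = []
--                 depth = 1
--                 i += tlen
--             else:
--                 out.append(body[i])
--                 i += 1
--         else:
--             ch = body[i]
--             if ch == "{":
--                 depth += 1
--                 inner.append(ch)
--             elif ch == "}":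
--                 depth -= 1
--                 if depth == 0:
--                     out.append(replacement_prefix)
--                     out.append("".join(inner))
--                     inner = None
--                 else:
--                     inner.append(ch)
--             else:
--                 inner.append(ch)
--             i += 1
--     if inner is not None:
--         raise ValueError("unbalanced braces")
--     return "".join(out)
-- ===== Notes on version B (the rewrite author's own statement) =====
-- stated objective: alternative
-- what changed: Replaces A's find()-loop plus a separate brace-extractor helper (index arithmetic and slicing) by a single left-to-right character automaton with an explicit two-mode state (copying vs. inside-braces) and a running depth counter.
import Mathlib
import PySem

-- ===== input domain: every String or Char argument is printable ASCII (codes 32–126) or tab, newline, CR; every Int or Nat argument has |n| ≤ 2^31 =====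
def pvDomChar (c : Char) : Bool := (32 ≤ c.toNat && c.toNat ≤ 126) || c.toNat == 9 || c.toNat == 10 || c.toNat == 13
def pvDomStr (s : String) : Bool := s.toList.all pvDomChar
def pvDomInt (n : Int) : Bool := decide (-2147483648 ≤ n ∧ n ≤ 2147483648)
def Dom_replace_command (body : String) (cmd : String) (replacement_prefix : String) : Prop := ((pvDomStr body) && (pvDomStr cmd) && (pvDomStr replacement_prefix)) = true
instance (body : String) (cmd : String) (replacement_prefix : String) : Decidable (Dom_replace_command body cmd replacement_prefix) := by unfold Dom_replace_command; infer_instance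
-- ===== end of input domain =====

-- B replaces A's find()-loop + separate brace-extractor by a single two-mode character automaton
-- with a running depth counter (objective: alternative decomposition, same cost).


-- ===== PORT A =====
-- _extract_braced's `for i in range(start_open, len(src))` loop, with `depth`;
-- returns (src[start_open+1:i], i+1) when depth hits 0, none = ValueError "unbalanced braces".
def pvExtractLoop (src : List Char) (startOpen : Int) (i : Nat) (depth : Int) :
    Option (List Char × Int) :=
  if h : i < src.length then
    if src[i] = '{' then pvExtractLoop src startOpen (i + 1) (depth + 1)
    else if src[i] = '}' then
      if depth - 1 = 0 then
        some (PySem.List.slice src (some (startOpen + 1)) (some (i : Int)), ((i : Int) + 1))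
      else pvExtractLoop src startOpen (i + 1) (depth - 1)
    else pvExtractLoop src startOpen (i + 1) depth
  else none
termination_by src.length - i

-- _extract_braced: the guard raising ValueError "expected '{'" becomes `none`.
def pvExtractBraced (src : List Char) (startOpen : Int) : Option (List Char × Int) :=
  if startOpen < 0 ∨ (src.length : Int) ≤ startOpen ∨
      PySem.List.pyGet? src startOpen ≠ some '{' then none
  else pvExtractLoop src startOpen startOpen.toNat 0

-- replace_command's `while i < len(body)` loop; `none` = a ValueError escaped.
def pvLoopA (body token pre : List Char) (i : Nat) : Option (List Char) :=
  if h : i < body.length then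
    let j := PySem.Chars.findFrom body token (i : Int) none   -- body.find(token, i)
    if j = -1 then some (PySem.List.slice body (some (i : Int)) none)   -- body[i:]
    else
      match pvExtractBraced body (j + (token.length : Int) - 1) with
      | none => none
      | some (inner, after) =>
        if hlt : i < after.toNat then   -- totality guard; unreachable: after > i always
          match pvLoopA body token pre after.toNat with
          | none => none
          | some rest =>
            some (PySem.List.slice body (some (i : Int)) (some j) ++ (pre ++ inner) ++ rest)
        else none
  else some []
termination_by body.length - i
decreasing_by simp_wf; omega

def replace_command (body : String) (cmd : String) (replacement_prefix : String) : String :=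
  -- token = f"\\{cmd}{{", inlined
  match pvLoopA body.toList ('\\' :: (cmd.toList ++ ['{'])) replacement_prefix.toList 0 with
  | some out => String.ofList out   -- "".join(out)
  | none => ""   -- Python raises ValueError here (outside Pre_)

-- ===== PORT B =====
-- inside-braces mode: depth counter, `inner` accumulator; consumes up to the matching '}'.
def pvInnerScan (depth : Int) (acc : List Char) : List Char → Option (List Char × List Char)
  | [] => none   -- ValueError "unbalanced braces"
  | c :: cs =>
    if c = '{' then pvInnerScan (depth + 1) (acc ++ [c]) cs
    else if c = '}' then
      if depth - 1 = 0 then some (acc, cs)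
      else pvInnerScan (depth - 1) (acc ++ [c]) cs
    else pvInnerScan depth (acc ++ [c]) cs

-- termination helper for pvOuterScan (the inner scan consumes at least the closing brace)
theorem pvInnerScan_rest_length (s : List Char) (d : Int) (acc inner rest : List Char)
    (h : pvInnerScan d acc s = some (inner, rest)) : rest.length < s.length := by
  induction s generalizing d acc with
  | nil => simp [pvInnerScan] at h
  | cons c cs ih =>
    simp only [pvInnerScan] at h
    split_ifs at h with h1 h2 h3
    · exact Nat.lt_succ_of_lt (ih _ _ h)
    · simp only [Option.some.injEq, Prod.mk.injEq] at h
      simp [← h.2]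
    · exact Nat.lt_succ_of_lt (ih _ _ h)
    · exact Nat.lt_succ_of_lt (ih _ _ h)

-- copying mode: emit characters until `token` starts here, then hand over to pvInnerScan.
def pvOuterScan (token pre : List Char) : List Char → Option (List Char)
  | [] => some []
  | c :: cs =>
    if token <+: (c :: cs) then   -- body.startswith(token, i)
      match hin : pvInnerScan 1 [] ((c :: cs).drop token.length) with
      | none => none   -- ValueError "unbalanced braces"
      | some (inner, rest) => (pvOuterScan token pre rest).map (fun r => (pre ++ inner) ++ r)
    else (pvOuterScan token pre cs).map (fun r => c :: r)
termination_by s => s.length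
decreasing_by
  all_goals
    first
      | (have h1 := pvInnerScan_rest_length _ _ _ _ _ hin
         rw [List.length_drop] at h1
         simp only [List.length_cons] at h1 ⊢
         omega)
      | simp

def replace_command_alt (body : String) (cmd : String) (replacement_prefix : String) : String :=
  -- token = "\\" + cmd + "{", inlined
  match pvOuterScan ('\\' :: (cmd.toList ++ ['{'])) replacement_prefix.toList body.toList with
  | some out => String.ofList out   -- "".join(out)
  | none => ""   -- Python raises ValueError here (outside Pre_)

-- ===== PRECONDITION & SPEC =====
-- the ascending list of all start positions of `token` in `body`
def pvOccs (body token : List Char) : List Nat :=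
  (List.range body.length).filter (fun j => token.isPrefixOf (body.drop j))

-- length of the shortest prefix of s (which starts at a '{') whose braces balance;
-- none = that opening brace never closes
def pvCloseLen (s : List Char) : Option Nat :=
  (List.range (s.length + 1)).find?
    (fun k => decide (1 ≤ k) && ((s.take k).count '{' == (s.take k).count '}'))

-- occurrence-level check: walk the occurrences left to right keeping the resume
-- position i; occurrences before i were consumed by an earlier replacement and are
-- skipped; a reached occurrence whose brace never closes means A raises.
def pvBalancedAt (body : List Char) (tl : Nat) : List Nat → Nat → Bool
  | [], _ => true
  | j :: js, i =>
    if j < i then pvBalancedAt body tl js i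
    else
      match pvCloseLen (body.drop (j + tl - 1)) with
      | none => false
      | some k => pvBalancedAt body tl js (j + tl - 1 + k)

-- Pre_ excludes exactly the inputs on which A raises ValueError ("unbalanced braces"):
-- those where the left-to-right replacement scan reaches an occurrence of "\cmd{"
-- whose opening brace never closes.  On every input A returns on, Pre_ holds.
def Pre_replace_command (body : String) (cmd : String) (replacement_prefix : String) : Prop :=
  pvBalancedAt body.toList (cmd.toList.length + 2)
    (pvOccs body.toList ('\\' :: (cmd.toList ++ ['{']))) 0 = true

instance (body : String) (cmd : String) (replacement_prefix : String) :
    Decidable (Pre_replace_command body cmd replacement_prefix) := by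
  unfold Pre_replace_command; infer_instance

def pvWitness_replace_command : String × String × String := ("x \\em{a{b}c} y", "em", "PRE: ")

def Spec_replace_command (body : String) (cmd : String) (replacement_prefix : String)
    (out : String) : Prop := out = replace_command_alt body cmd replacement_prefix
instance (body : String) (cmd : String) (replacement_prefix : String) (out : String) :
    Decidable (Spec_replace_command body cmd replacement_prefix out) := by
  unfold Spec_replace_command; infer_instance

-- ===== CLAIM (what is proved, stated in full; the proofs are below) =====
def Claim_equal_replace_command : Prop := ∀ (body : String) (cmd : String) (replacement_prefix : String), Dom_replace_command body cmd replacement_prefix → Pre_replace_command body cmd replacement_prefix → Spec_replace_command body cmd replacement_prefix (replace_command body cmd replacement_prefix)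

-- ===== LEMMAS AND PROOFS =====

-- bounds and value of A's extract loop results
theorem pvExtractLoop_bounds (src : List Char) (so : Int) (i : Nat) (d : Int)
    (inner : List Char) (a : Int) (h : pvExtractLoop src so i d = some (inner, a)) :
    (i : Int) < a ∧ a ≤ src.length ∧
      inner = PySem.List.slice src (some (so + 1)) (some (a - 1)) := by
  revert h
  induction i, d using pvExtractLoop.induct src generalizing inner a with
  | case1 i d hlt hc ih =>
    intro h
    rw [pvExtractLoop, dif_pos hlt, if_pos hc] at h
    obtain ⟨h1, h2, h3⟩ := ih inner a h
    exact ⟨by push_cast at h1 ⊢; omega, h2, h3⟩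
  | case2 i d hlt hc1 hc2 hd =>
    intro h
    rw [pvExtractLoop, dif_pos hlt, if_neg hc1, if_pos hc2, if_pos hd] at h
    simp only [Option.some.injEq, Prod.mk.injEq] at h
    obtain ⟨h1, h2⟩ := h
    have ha : a - 1 = (i : Int) := by omega
    refine ⟨by omega, by omega, by rw [ha, ← h1]⟩
  | case3 i d hlt hc1 hc2 hd ih =>
    intro h
    rw [pvExtractLoop, dif_pos hlt, if_neg hc1, if_pos hc2, if_neg hd] at h
    obtain ⟨h1, h2, h3⟩ := ih inner a h
    exact ⟨by push_cast at h1 ⊢; omega, h2, h3⟩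
  | case4 i d hlt hc1 hc2 ih =>
    intro h
    rw [pvExtractLoop, dif_pos hlt, if_neg hc1, if_neg hc2] at h
    obtain ⟨h1, h2, h3⟩ := ih inner a h
    exact ⟨by push_cast at h1 ⊢; omega, h2, h3⟩
  | case5 i d hlt =>
    intro h
    rw [pvExtractLoop, dif_neg hlt] at h
    exact absurd h (by simp)

-- B's inner scan computes exactly what A's extract loop computes, step for step
theorem pvMainExt (L : List Char) (so : Int) (i : Nat) (d : Int) (acc : List Char)
    (hi : i ≤ L.length) :
    pvInnerScan d acc (L.drop i) =
      (pvExtractLoop L so i d).map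
        (fun p => (acc ++ (L.drop i).take (p.2.toNat - 1 - i), L.drop p.2.toNat)) := by
  revert hi
  induction i, d using pvExtractLoop.induct L generalizing acc with
  | case1 i d hlt hc ih =>
    intro hi
    rw [pvExtractLoop, dif_pos hlt, if_pos hc]
    rw [List.drop_eq_getElem_cons hlt]
    rw [pvInnerScan, if_pos hc]
    rw [ih (acc ++ [L[i]]) (by omega)]
    cases hext : pvExtractLoop L so (i + 1) (d + 1) with
    | none => simp
    | some p =>
      obtain ⟨inr, a⟩ := p
      obtain ⟨hb1, hb2, _⟩ := pvExtractLoop_bounds L so (i + 1) (d + 1) inr a hext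
      have hk : a.toNat - 1 - i = (a.toNat - 1 - (i + 1)) + 1 := by omega
      simp only [Option.map_some]
      congr 1
      rw [hk, List.take_succ_cons]
      simp
  | case2 i d hlt hc1 hc2 hd =>
    intro hi
    rw [pvExtractLoop, dif_pos hlt, if_neg hc1, if_pos hc2, if_pos hd]
    rw [List.drop_eq_getElem_cons hlt]
    rw [pvInnerScan, if_neg hc1, if_pos hc2, if_pos hd]
    simp
  | case3 i d hlt hc1 hc2 hd ih =>
    intro hi
    rw [pvExtractLoop, dif_pos hlt, if_neg hc1, if_pos hc2, if_neg hd]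
    rw [List.drop_eq_getElem_cons hlt]
    rw [pvInnerScan, if_neg hc1, if_pos hc2, if_neg hd]
    rw [ih (acc ++ [L[i]]) (by omega)]
    cases hext : pvExtractLoop L so (i + 1) (d - 1) with
    | none => simp
    | some p =>
      obtain ⟨inr, a⟩ := p
      obtain ⟨hb1, hb2, _⟩ := pvExtractLoop_bounds L so (i + 1) (d - 1) inr a hext
      have hk : a.toNat - 1 - i = (a.toNat - 1 - (i + 1)) + 1 := by omega
      simp only [Option.map_some]
      congr 1
      rw [hk, List.take_succ_cons]
      simp
  | case4 i d hlt hc1 hc2 ih =>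
    intro hi
    rw [pvExtractLoop, dif_pos hlt, if_neg hc1, if_neg hc2]
    rw [List.drop_eq_getElem_cons hlt]
    rw [pvInnerScan, if_neg hc1, if_neg hc2]
    rw [ih (acc ++ [L[i]]) (by omega)]
    cases hext : pvExtractLoop L so (i + 1) d with
    | none => simp
    | some p =>
      obtain ⟨inr, a⟩ := p
      obtain ⟨hb1, hb2, _⟩ := pvExtractLoop_bounds L so (i + 1) d inr a hext
      have hk : a.toNat - 1 - i = (a.toNat - 1 - (i + 1)) + 1 := by omega
      simp only [Option.map_some]
      congr 1
      rw [hk, List.take_succ_cons]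
      simp
  | case5 i d hlt =>
    intro hi
    rw [pvExtractLoop, dif_neg hlt]
    have : L.drop i = [] := by rw [List.drop_eq_nil_iff]; omega
    rw [this, pvInnerScan]
    simp

-- unfolding equation for the automaton's token branch
theorem pvOuterScan_cons_pos (t p : List Char) (c : Char) (cs : List Char) (h : t <+: c :: cs) :
    pvOuterScan t p (c :: cs) =
      match pvInnerScan 1 [] ((c :: cs).drop t.length) with
      | none => none
      | some (inner, rest) => (pvOuterScan t p rest).map (fun r => (p ++ inner) ++ r) := by
  rw [pvOuterScan, if_pos h]
  rcases hx : pvInnerScan 1 [] ((c :: cs).drop t.length) with _ | ⟨inner, rest⟩ <;> simp [hx]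

-- no occurrence of the token: the automaton copies everything
theorem pvNoFind (t p s : List Char) (h : ¬ t <:+: s) : pvOuterScan t p s = some s := by
  induction s with
  | nil => rw [pvOuterScan]
  | cons c cs ih =>
    rw [pvOuterScan, if_neg (fun hp => h hp.isInfix)]
    rw [ih (fun hinf => h (hinf.trans (List.suffix_cons c cs).isInfix))]
    simp

-- up to the first occurrence the automaton just copies characters
theorem pvCopy (t p L : List Char) (n i : Nat)
    (h : ∀ m, i ≤ m → m < i + n → ¬ t <+: L.drop m) :
    pvOuterScan t p (L.drop i) =
      (pvOuterScan t p (L.drop (i + n))).map (fun r => (L.drop i).take n ++ r) := by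
  induction n generalizing i with
  | zero => simp
  | succ n ih =>
    by_cases hlen : i < L.length
    · have h' : ¬ t <+: (L[i] :: L.drop (i + 1)) := by
        rw [← List.drop_eq_getElem_cons hlen]; exact h i le_rfl (by omega)
      rw [List.drop_eq_getElem_cons hlen, pvOuterScan, if_neg h']
      have hshift : ∀ m, i + 1 ≤ m → m < i + 1 + n → ¬ t <+: L.drop m := by
        intro m hm1 hm2; exact h m (by omega) (by omega)
      rw [ih (i + 1) hshift]
      have harg : i + 1 + n = i + (n + 1) := by omega
      rw [harg, Option.map_map]
      cases pvOuterScan t p (L.drop (i + (n + 1))) with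
      | none => simp
      | some r =>
        simp only [Option.map_some, Function.comp_def]
        rw [List.take_succ_cons]
        simp
    · have h1 : L.drop i = [] := by rw [List.drop_eq_nil_iff]; omega
      have h2 : L.drop (i + (n + 1)) = [] := by rw [List.drop_eq_nil_iff]; omega
      rw [h1, h2]
      rw [pvOuterScan]
      simp

-- the main correspondence: A's chunked loop = B's automaton, from any index
theorem pvEQaux (L u p : List Char) :
    ∀ (n i : Nat), L.length - i ≤ n → i ≤ L.length →
      pvLoopA L (u ++ ['{']) p i = pvOuterScan (u ++ ['{']) p (L.drop i) := by
  intro n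
  induction n with
  | zero =>
    intro i h1 h2
    have hi : i = L.length := by omega
    rw [pvLoopA, dif_neg (by omega), hi, List.drop_length, pvOuterScan]
  | succ n ih =>
    intro i h1 h2
    by_cases hlt : i < L.length
    · rw [pvLoopA, dif_pos hlt]
      set t := u ++ ['{'] with ht
      set j := PySem.Chars.findFrom L t (i : Int) none with hj
      by_cases hj1 : j = -1
      · rw [if_pos hj1, PySem.List.slice_from_natCast]
        exact (pvNoFind t p _ ((PySem.Chars.findFrom_natCast_eq_neg_one_iff L t i h2).mp hj1)).symm
      · rw [if_neg hj1]
        obtain ⟨hij, hpre, hmin⟩ := PySem.Chars.findFrom_natCast_spec L t i h2 hj1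
        have hj0 : (0 : Int) ≤ j := le_trans (Int.natCast_nonneg i) hij
        set jn := j.toNat with hjn
        have hjeq : (jn : Int) = j := Int.toNat_of_nonneg hj0
        have hijn : i ≤ jn := by omega
        have hlen_t : t.length = u.length + 1 := by simp [ht]
        have hpre_len : jn + t.length ≤ L.length := by
          have := hpre.length_le
          rw [List.length_drop] at this
          omega
        have hso : j + (t.length : Int) - 1 = ((jn + u.length : Nat) : Int) := by
          push_cast [hlen_t]; omega
        have hbrace : L[jn + u.length]'(by omega) = '{' := by
          have hg := hpre.getElem (i := u.length) (lt_of_lt_of_eq (Nat.lt_succ_self u.length) hlen_t.symm)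
          rw [List.getElem_drop] at hg
          exact hg.symm.trans (List.getElem_concat_length rfl (by simp [ht]))
        have hget : PySem.List.pyGet? L ((jn + u.length : Nat) : Int) = some '{' := by
          rw [PySem.List.pyGet?_natCast, List.getElem?_eq_getElem (by omega), hbrace]
        rw [hso, pvExtractBraced,
          if_neg (by
            push_neg
            refine ⟨Int.natCast_nonneg _, by exact_mod_cast (by omega : jn + u.length < L.length), hget⟩),
          Int.toNat_natCast,
          pvExtractLoop, dif_pos (by omega : jn + u.length < L.length), if_pos hbrace]
        simp only [zero_add]
        -- B side: copy up to jn, then the token branch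
        have hcopy := pvCopy t p L (jn - i) i
          (by intro m hm1 hm2; exact hmin m hm1 (by omega))
        rw [(by omega : i + (jn - i) = jn)] at hcopy
        rw [hcopy]
        have hdropjn : L.drop jn = L[jn]'(by omega) :: L.drop (jn + 1) :=
          List.drop_eq_getElem_cons (by omega)
        rw [hdropjn, pvOuterScan_cons_pos t p _ _ (by rw [← hdropjn]; exact hpre)]
        have hdrop2 : (L[jn]'(by omega) :: L.drop (jn + 1)).drop t.length
            = L.drop (jn + u.length + 1) := by
          rw [← hdropjn, List.drop_drop, hlen_t]
          congr 1
        have hmain := pvMainExt L ((jn + u.length : Nat) : Int) (jn + u.length + 1) 1 []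
          (by omega)
        cases hext : pvExtractLoop L ((jn + u.length : Nat) : Int) (jn + u.length + 1) 1 with
        | none =>
          rw [hext] at hmain
          simp only [Option.map_none] at hmain
          rw [hdrop2, hmain]
          simp
        | some q =>
          obtain ⟨inr, a⟩ := q
          rw [hext] at hmain
          obtain ⟨hb1, hb2, hb3⟩ :=
            pvExtractLoop_bounds L _ (jn + u.length + 1) 1 inr a hext
          have han1 : jn + u.length + 1 < a.toNat := by omega
          have han2 : a.toNat ≤ L.length := by omega
          simp only [Option.map_some] at hmain
          rw [hdrop2, hmain]
          -- inner content agreement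
          have hinr : inr = (L.drop (jn + u.length + 1)).take (a.toNat - 1 - (jn + u.length + 1)) := by
            rw [hb3]
            rw [(by push_cast; omega : ((jn + u.length : Nat) : Int) + 1 = ((jn + u.length + 1 : Nat) : Int)),
                (by omega : a - 1 = ((a.toNat - 1 : Nat) : Int)),
                PySem.List.slice_natCast]
          simp only [Option.map_some]
          rw [dif_pos (show i < a.toNat by omega)]
          rw [ih a.toNat (by omega) (by omega)]
          cases houter : pvOuterScan t p (L.drop a.toNat) with
          | none => simp
          | some rest =>
            simp only [Option.map_some, Option.some.injEq]
            rw [← hjeq, PySem.List.slice_natCast, hinr]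
            simp [List.append_assoc]
    · have hi : i = L.length := by omega
      rw [pvLoopA, dif_neg (by omega), hi, List.drop_length, pvOuterScan]

theorem pvEQ (L u p : List Char) (i : Nat) (hi : i ≤ L.length) :
    pvLoopA L (u ++ ['{']) p i = pvOuterScan (u ++ ['{']) p (L.drop i) :=
  pvEQaux L u p (L.length - i) i le_rfl hi

-- ===== VERDICT (by name: the statement is the Claim_ definition above) =====
theorem replace_command_spec : Claim_equal_replace_command := by
  intro body cmd pre _ _
  unfold Spec_replace_command replace_command replace_command_alt
  have h := pvEQ body.toList ('\\' :: cmd.toList) pre.toList 0 (Nat.zero_le _)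
  rw [List.drop_zero] at h
  rw [show ('\\' :: cmd.toList) ++ ['{'] = '\\' :: (cmd.toList ++ ['{']) from rfl] at h
  rw [h]
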